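-- pv_equiv track=rewrite | github.com/TonyTerrasa/i3shortcuts | i3_config_parser.py | get_shortcut
-- ===== SOURCE A (Python) =====
-- SHORTCUT_SIGNAL = "bindsym"
--
-- def get_shortcut(line):
--
--     output = []
--     start = len(SHORTCUT_SIGNAL)+1
--     current_start = start
--     for i, char in enumerate(line[start:]):
--         if char in ("+", " "):
--
--             output.append(line[current_start:start+i])
--             current_start = start + i + 1
--
--             # end of the shortcut
--             if char == " ": break
--
--     output.append(line[current_start:])
--
--     return output
-- ===== SOURCE B (Python) =====
-- SHORTCUT_SIGNAL = "bindsym"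
--
--
-- def get_shortcut(line):
--     rest = line[len(SHORTCUT_SIGNAL) + 1:]
--     keys, sep, command = rest.partition(' ')
--     output = keys.split('+')
--     if sep:
--         output.append(command)
--     return output
-- ===== Notes on version B (the rewrite author's own statement) =====
-- stated objective: simpler
-- what changed: Replaces A's single interleaved index-tracking character scan (manual slice bookkeeping and a break) with a two-phase decomposition: partition the tail at the first space, split the key part on the plus separator, and append the command only if a space was found.
import Mathlib
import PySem

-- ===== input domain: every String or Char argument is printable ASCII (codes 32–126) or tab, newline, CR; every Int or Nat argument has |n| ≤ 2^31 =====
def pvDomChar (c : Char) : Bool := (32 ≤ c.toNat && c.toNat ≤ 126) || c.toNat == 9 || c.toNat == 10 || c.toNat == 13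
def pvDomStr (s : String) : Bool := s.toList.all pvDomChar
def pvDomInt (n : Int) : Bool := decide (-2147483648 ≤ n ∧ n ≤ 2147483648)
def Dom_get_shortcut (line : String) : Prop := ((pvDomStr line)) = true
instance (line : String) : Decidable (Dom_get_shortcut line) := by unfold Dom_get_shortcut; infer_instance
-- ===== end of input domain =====

-- B replaces A's single index-tracking character scan (manual slice bookkeeping, break at ' ')
-- by a two-phase decomposition: partition the tail at the first space, split the key part on '+';
-- objective: simpler. Equal return value proved below.

def pvShortcutSignal : List Char := "bindsym".toList

-- ===== PORT A =====
-- A's for-loop over enumerate(line[start:]) with current_start bookkeeping and break at ' '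
def pvALoop (line : List Char) (start : Int) (items : List (Int × Char))
    (output : List (List Char)) (currentStart : Int) : List (List Char) × Int :=
  match items with
  | [] => (output, currentStart)
  | (i, c) :: rest =>
    if c = '+' ∨ c = ' ' then
      let output' := output ++ [PySem.List.slice line (some currentStart) (some (start + i))]
      let cs' := start + i + 1
      if c = ' ' then (output', cs') else pvALoop line start rest output' cs'
    else pvALoop line start rest output currentStart

def get_shortcut (line : String) : List String :=
  let l := line.toList
  let start : Int := PySem.Chars.len pvShortcutSignal + 1
  let res := pvALoop l start (PySem.List.enumerate (PySem.List.slice l (some start) none)) [] start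
  (res.1 ++ [PySem.List.slice l (some res.2) none]).map (fun cs => String.ofList cs)

-- ===== PORT B =====
-- str.partition(sep) ported by hand (no PySem primitive): Python returns
-- (s[:i], sep, s[i+len(sep):]) at the first occurrence i of sep, else (s, '', ''); exact for sep ≠ ''.
def pvPartition (s : List Char) (sep : List Char) : List Char × List Char × List Char :=
  let i := PySem.Chars.find s sep
  if i = -1 then (s, [], []) else (s.take i.toNat, sep, s.drop (i.toNat + sep.length))

def get_shortcut_alt (line : String) : List String :=
  let rest := PySem.List.slice line.toList (some (PySem.Chars.len pvShortcutSignal + 1)) none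
  let p := pvPartition rest [' ']
  let output := PySem.Chars.splitOn p.1 ['+']
  (if p.2.1 ≠ [] then output ++ [p.2.2] else output).map (fun cs => String.ofList cs)

-- ===== PRECONDITION & SPEC =====
def Spec_get_shortcut (line : String) (out : List String) : Prop := out = get_shortcut_alt line
instance (line : String) (out : List String) : Decidable (Spec_get_shortcut line out) := by unfold Spec_get_shortcut; infer_instance

-- ===== CLAIM (what is proved, stated in full; the proofs are below) =====
def Claim_equal_get_shortcut : Prop := ∀ (line : String), Dom_get_shortcut line → Spec_get_shortcut line (get_shortcut line)

-- ===== LEMMAS AND PROOFS =====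

-- prepend `pre` onto the first piece of a (never empty) piece list
def pvConsHead (pre : List Char) (ll : List (List Char)) : List (List Char) :=
  match ll with
  | [] => [pre]
  | h :: t => (pre ++ h) :: t

-- reference: split on a single separator char
def pvSp (c : Char) : List Char → List (List Char)
  | [] => [[]]
  | x :: xs => if x = c then [] :: pvSp c xs else pvConsHead [x] (pvSp c xs)

-- reference for A: scan, flushing `seen` at '+', stopping at the first ' '
def pvAspl : List Char → List Char → List (List Char)
  | seen, [] => [seen]
  | seen, c :: todo =>
    if c = ' ' then [seen, todo]
    else if c = '+' then seen :: pvAspl [] todo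
    else pvAspl (seen ++ [c]) todo

theorem pvSp_ne_nil (c : Char) (l : List Char) : pvSp c l ≠ [] := by
  cases l with
  | nil => simp [pvSp]
  | cons x xs =>
    simp only [pvSp]
    split
    · simp
    · cases h : pvSp c xs <;> simp [pvConsHead]

theorem pvConsHead_nil {ll : List (List Char)} (h : ll ≠ []) : pvConsHead [] ll = ll := by
  cases ll with
  | nil => exact absurd rfl h
  | cons a t => simp [pvConsHead]

theorem pvConsHead_consHead (a b : List Char) (ll : List (List Char)) :
    pvConsHead a (pvConsHead b ll) = pvConsHead (a ++ b) ll := by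
  cases ll <;> simp [pvConsHead]

theorem pvSplitOn_go (c : Char) (fuel : Nat) : ∀ (l cur : List Char) (accs : List (List Char)),
    l.length < fuel →
    PySem.Chars.splitOn.go [c] fuel l cur accs = accs.reverse ++ pvConsHead cur.reverse (pvSp c l) := by
  induction fuel with
  | zero => intro l cur accs h; omega
  | succ n ih =>
    intro l cur accs h
    cases l with
    | nil =>
      simp [PySem.Chars.splitOn.go, pvSp, pvConsHead]
    | cons x xs =>
      rw [PySem.Chars.splitOn.go]
      simp only [List.isPrefixOf, Bool.and_true]
      by_cases hx : c = x
      · subst hx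
        simp only [beq_self_eq_true, if_pos]
        rw [ih _ _ _ (by simpa using Nat.lt_of_succ_lt_succ h)]
        simp only [List.length_cons, List.drop_succ_cons, List.drop_zero, List.reverse_nil, List.length_nil]
        rw [pvConsHead_nil (pvSp_ne_nil c xs)]
        simp [pvSp, pvConsHead]
      · rw [if_neg (by simp [hx])]
        rw [ih _ _ _ (by simpa using Nat.lt_of_succ_lt_succ h)]
        simp only [pvSp]
        rw [if_neg (fun hh => hx hh.symm), pvConsHead_consHead]
        simp

theorem pvSplitOn_eq_sp (c : Char) (l : List Char) :
    PySem.Chars.splitOn l [c] = pvSp c l := by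
  rw [PySem.Chars.splitOn]
  rw [pvSplitOn_go c (l.length + 1) l [] [] (by omega)]
  simpa using pvConsHead_nil (pvSp_ne_nil c l)

theorem pvAspl_no_space : ∀ (todo seen : List Char), (∀ x ∈ todo, x ≠ ' ') →
    pvAspl seen todo = pvConsHead seen (pvSp '+' todo) := by
  intro todo
  induction todo with
  | nil => intro seen _; simp [pvAspl, pvSp, pvConsHead]
  | cons c td ih =>
    intro seen hns
    have hc : c ≠ ' ' := hns c (by simp)
    by_cases hp : c = '+'
    · subst hp
      rw [pvAspl, if_neg hc, if_pos rfl, ih [] (fun x hx => hns x (by simp [hx]))]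
      rw [pvConsHead_nil (pvSp_ne_nil _ _)]
      simp [pvSp, pvConsHead]
    · rw [pvAspl, if_neg hc, if_neg hp, ih _ (fun x hx => hns x (by simp [hx]))]
      simp only [pvSp]
      rw [if_neg hp, pvConsHead_consHead]

theorem pvAspl_space : ∀ (todo : List Char) (i : Nat), ∀ (seen : List Char),
    todo[i]? = some ' ' → (∀ j < i, todo[j]? ≠ some ' ') →
    pvAspl seen todo = pvConsHead seen (pvSp '+' (todo.take i)) ++ [todo.drop (i + 1)] := by
  intro todo
  induction todo with
  | nil => intro i seen h _; simp at h
  | cons c td ih =>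
    intro i seen hi hbefore
    cases i with
    | zero =>
      simp only [List.getElem?_cons_zero, Option.some.injEq] at hi
      rw [pvAspl, if_pos hi]
      simp [pvSp, pvConsHead]
    | succ n =>
      simp only [List.getElem?_cons_succ] at hi
      have hc : c ≠ ' ' := by
        intro hc; exact hbefore 0 (by omega) (by simp [hc])
      have hb' : ∀ j < n, td[j]? ≠ some ' ' := by
        intro j hj; exact fun hh => hbefore (j+1) (by omega) (by simpa using hh)
      by_cases hp : c = '+'
      · subst hp
        rw [pvAspl, if_neg hc, if_pos rfl, ih n [] hi hb']
        rw [pvConsHead_nil (pvSp_ne_nil _ _)]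
        simp [pvSp, pvConsHead]
      · rw [pvAspl, if_neg hc, if_neg hp, ih n _ hi hb']
        simp only [pvSp, List.take_succ_cons]
        rw [if_neg hp, pvConsHead_consHead]
        simp

theorem pvALoop_inv (l : List Char) : ∀ (tl : List Char) (k j : Nat) (output : List (List Char)),
    j ≤ k → tl = (l.drop 8).drop k →
    (pvALoop l 8 (PySem.List.enumerate tl (k : Int)) output (8 + (j : Int))).1
        ++ [PySem.List.slice l (some ((pvALoop l 8 (PySem.List.enumerate tl (k : Int)) output (8 + (j : Int))).2)) none]
      = output ++ pvAspl (((l.drop 8).drop j).take (k - j)) tl := by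
  intro tl
  induction tl with
  | nil =>
    intro k j output hjk htl
    rw [PySem.List.enumerate_nil]
    simp only [pvALoop, pvAspl]
    rw [PySem.List.slice_from _ (by positivity)]
    have h1 : ((8:Int) + (j:Int)).toNat = 8 + j := by omega
    rw [h1]
    have hlen : ((l.drop 8).drop k).length = 0 := by rw [← htl]; rfl
    simp only [List.length_drop] at hlen
    have h2 : ((l.drop 8).drop j).take (k - j) = (l.drop 8).drop j := by
      apply List.take_of_length_le
      simp only [List.length_drop]
      omega
    rw [h2, List.drop_drop]
  | cons c td ih =>
    intro k j output hjk htl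
    have htd : td = (l.drop 8).drop (k + 1) := by
      rw [← List.drop_drop, ← htl, List.drop_one, List.tail_cons]
    have hck : (l.drop 8)[k]? = some c := by
      have h0 : ((l.drop 8).drop k)[0]? = some c := by rw [← htl]; rfl
      simpa using h0
    have hcast1 : (8:Int) + (k:Int) = ((8 + k : Nat) : Int) := by push_cast; ring
    have hcast2 : (8:Int) + (j:Int) = ((8 + j : Nat) : Int) := by push_cast; ring
    rw [PySem.List.enumerate_cons]
    by_cases hsp : c = ' '
    · subst hsp
      simp only [pvALoop, pvAspl, reduceIte, or_true, true_or, if_true]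
      rw [hcast2, hcast1, PySem.List.slice_natCast]
      have h3 : 8 + k - (8 + j) = k - j := by omega
      rw [h3, ← List.drop_drop]
      rw [PySem.List.slice_from _ (by omega)]
      have h4 : (((8 + k : Nat) : Int) + 1).toNat = 8 + (k + 1) := by omega
      rw [List.drop_drop] at htd
      rw [h4, ← htd]
      simp
    · by_cases hpl : c = '+'
      · subst hpl
        simp only [pvALoop, pvAspl, reduceIte, eq_self_iff_true, true_or, if_true, if_neg hsp]
        have hit : (k:Int) + 1 = ((k + 1 : Nat) : Int) := by push_cast; ring
        have hcs : 8 + ((k:Int)) + 1 = 8 + ((k + 1 : Nat) : Int) := by push_cast; ring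
        rw [hit, hcs, ih (k+1) (k+1) _ (le_refl _) htd]
        rw [hcast2, hcast1, PySem.List.slice_natCast]
        have h3 : 8 + k - (8 + j) = k - j := by omega
        rw [h3, ← List.drop_drop]
        simp
      · have hne : ¬ (c = '+' ∨ c = ' ') := by tauto
        simp only [pvALoop, pvAspl, if_neg hne, if_neg hsp, if_neg hpl]
        have hit : (k:Int) + 1 = ((k + 1 : Nat) : Int) := by push_cast; ring
        rw [hit, ih (k+1) j _ (by omega) htd]
        have h5 : ((l.drop 8).drop j).take (k + 1 - j)
            = ((l.drop 8).drop j).take (k - j) ++ [c] := by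
          have h6 : k + 1 - j = (k - j) + 1 := by omega
          rw [h6, List.take_add_one]
          have h7 : ((l.drop 8).drop j)[k - j]? = some c := by
            rw [List.getElem?_drop]
            have hh : j + (k - j) = k := by omega
            rw [hh, hck]
          rw [h7]
          rfl
        rw [h5]

theorem pvStart_eq : PySem.Chars.len pvShortcutSignal + 1 = (8 : Int) := by decide

theorem pvSlice8 (l : List Char) : PySem.List.slice l (some (8 : Int)) none = l.drop 8 := by
  rw [PySem.List.slice_from _ (by omega)]
  rfl

theorem pvSingleton_prefix (a : Char) (l : List Char) : [a] <+: l ↔ l.head? = some a := by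
  constructor
  · rintro ⟨t, rfl⟩; rfl
  · intro h
    cases l with
    | nil => simp at h
    | cons x xs =>
      simp only [List.head?_cons, Option.some.injEq] at h
      exact ⟨xs, by rw [h]; rfl⟩

theorem pvA_eq_aspl (line : String) :
    get_shortcut line = (pvAspl [] (line.toList.drop 8)).map (fun cs => String.ofList cs) := by
  simp only [get_shortcut, pvStart_eq, pvSlice8]
  have h := pvALoop_inv line.toList (line.toList.drop 8) 0 0 [] (le_refl 0) (by simp)
  simp only [Nat.cast_zero, add_zero, Nat.sub_zero, List.drop_zero, List.take_zero,
    List.nil_append] at h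
  rw [h]

theorem pvB_eq_aspl (line : String) :
    get_shortcut_alt line = (pvAspl [] (line.toList.drop 8)).map (fun cs => String.ofList cs) := by
  simp only [get_shortcut_alt, pvStart_eq, pvSlice8, pvPartition]
  by_cases h : PySem.Chars.find (line.toList.drop 8) [' '] = -1
  · have hns : ∀ x ∈ line.toList.drop 8, x ≠ ' ' := by
      intro x hx hx'
      subst hx'
      exact (PySem.Chars.find_eq_neg_one_iff _ _).mp h ((List.singleton_infix_iff _ _).mpr hx)
    rw [if_pos h, pvAspl_no_space _ [] hns, pvConsHead_nil (pvSp_ne_nil _ _)]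
    simp [pvSplitOn_eq_sp]
  · rw [if_neg h]
    have h0 : 0 ≤ PySem.Chars.find (line.toList.drop 8) [' '] := by
      have := PySem.Chars.neg_one_le_find (line.toList.drop 8) [' ']
      omega
    obtain ⟨hpre, hbef⟩ := PySem.Chars.find_spec h0
    set i := (PySem.Chars.find (line.toList.drop 8) [' ']).toNat with hi
    have hhead : (line.toList.drop 8)[i]? = some ' ' := by
      rw [← List.head?_drop]
      exact (pvSingleton_prefix _ _).mp hpre
    have hbef' : ∀ j < i, (line.toList.drop 8)[j]? ≠ some ' ' := by
      intro j hj hcontra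
      exact hbef j hj ((pvSingleton_prefix _ _).mpr (by rw [List.head?_drop]; exact hcontra))
    rw [pvAspl_space _ i [] hhead hbef', pvConsHead_nil (pvSp_ne_nil _ _)]
    simp [pvSplitOn_eq_sp]

-- ===== VERDICT (by name: the statement is the Claim_ definition above) =====
theorem get_shortcut_spec : Claim_equal_get_shortcut := by
  intro line _
  unfold Spec_get_shortcut
  rw [pvA_eq_aspl, pvB_eq_aspl]
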